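-- pv_equiv track=rewrite | github.com/JongHoooon/Algorithm-Study | BaekJoon/problems/8_Brute_Force/1239_차트.py | check
-- ===== SOURCE A (Python) =====
-- def check(lst):
--     line = []
--     c = 0
--     ans = 0
--     for i in lst:
--         c += i
--         line.append(c)
--     for i in range(len(line)-1):
--         for t in range(i+1, len(line)):
--             if line[i] + 50 == line[t]:
--                 ans += 1
--     return ans
-- ===== SOURCE B (Python) =====
-- def check(lst):
--     seen = {}
--     c = 0
--     ans = 0
--     for i in lst:
--         c += i
--         ans += seen.get(c - 50, 0)
--         seen[c] = seen.get(c, 0) + 1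
--     return ans
-- ===== Notes on version B (the rewrite author's own statement) =====
-- stated objective: faster
-- what changed: Replaced the quadratic nested index scan over the prefix-sum list by a single pass that keeps a hash-map counter of prefix sums seen so far and looks up c-50 at each step.
import Mathlib
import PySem

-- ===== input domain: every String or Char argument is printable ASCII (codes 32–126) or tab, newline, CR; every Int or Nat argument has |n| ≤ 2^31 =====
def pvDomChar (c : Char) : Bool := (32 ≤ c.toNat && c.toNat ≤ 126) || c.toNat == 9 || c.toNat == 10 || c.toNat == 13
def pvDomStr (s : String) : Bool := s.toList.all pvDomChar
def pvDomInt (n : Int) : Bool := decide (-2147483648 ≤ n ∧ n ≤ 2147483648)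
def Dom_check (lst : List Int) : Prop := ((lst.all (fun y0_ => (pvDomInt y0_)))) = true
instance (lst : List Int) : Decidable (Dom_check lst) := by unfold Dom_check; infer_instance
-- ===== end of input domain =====

-- B replaces A's quadratic nested scan over the prefix-sum list by one pass with a
-- hash-map counter of the prefix sums seen so far (objective: faster).

-- ===== PORT A =====
def check (lst : List Int) : Int :=
  -- line = []; c = 0; for i in lst: c += i; line.append(c)
  let lc := lst.foldl (fun (p : List Int × Int) i => (p.1 ++ [p.2 + i], p.2 + i)) ([], 0)
  let line := lc.1
  -- for i in range(len(line)-1): for t in range(i+1, len(line)): if line[i]+50 == line[t]: ans += 1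
  (PySem.List.pyRange 0 (PySem.List.len line - 1)).foldl (fun ans i =>
    (PySem.List.pyRange (i + 1) (PySem.List.len line)).foldl (fun ans t =>
      if PySem.List.pyGetD line i 0 + 50 = PySem.List.pyGetD line t 0 then ans + 1 else ans)
      ans) 0

-- ===== PORT B =====
def check_alt (lst : List Int) : Int :=
  -- seen = {}; c = 0; ans = 0
  -- for i in lst: c += i; ans += seen.get(c-50, 0); seen[c] = seen.get(c, 0) + 1
  let st := lst.foldl (fun (st : PySem.Dict Int Int × Int × Int) i =>
    let c := st.2.1 + i
    let ans := st.2.2 + st.1.getD (c - 50) 0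
    (st.1.insert c (st.1.getD c 0 + 1), c, ans)) (PySem.Dict.empty, 0, 0)
  st.2.2

-- ===== PRECONDITION & SPEC =====
def Spec_check (lst : List Int) (out : Int) : Prop := out = check_alt lst
instance (lst : List Int) (out : Int) : Decidable (Spec_check lst out) := by unfold Spec_check; infer_instance

-- ===== CLAIM (what is proved, stated in full; the proofs are below) =====
def Claim_equal_check : Prop := ∀ (lst : List Int), Dom_check lst → Spec_check lst (check lst)

-- ===== LEMMAS AND PROOFS =====

-- prefix sums of lst starting from running total c (the values A appends to `line`,
-- and equally the successive values of B's variable c)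
def prefixes (c : Int) : List Int → List Int
  | [] => []
  | i :: r => (c + i) :: prefixes (c + i) r

-- number of pairs p < q with L[p] + 50 = L[q], counted by the earlier element
def pairCount : List Int → Int
  | [] => 0
  | x :: xs => (xs.count (x + 50) : Int) + pairCount xs

-- the same pairs counted by the later element, s = the elements already seen
def pairsSeen : List Int → List Int → Int
  | [], _ => 0
  | p :: rest, s => (s.count (p - 50) : Int) + pairsSeen rest (s ++ [p])

-- what one step of A's outer loop adds, for a given index i into L
def gA (L : List Int) (i : Int) : Int :=
  ((L.drop (i + 1).toNat).count (PySem.List.pyGetD L i 0 + 50) : Int)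

theorem prefixes_shift (lst : List Int) :
    ∀ (L : List Int) (c : Int),
      lst.foldl (fun (p : List Int × Int) i => (p.1 ++ [p.2 + i], p.2 + i)) (L, c)
        = (L ++ prefixes c lst, c + lst.sum) := by
  induction lst with
  | nil => intro L c; simp [prefixes]
  | cons i r ih =>
      intro L c
      simp only [List.foldl_cons, prefixes, ih, List.append_assoc, List.singleton_append,
        List.sum_cons, Prod.mk.injEq]
      exact ⟨trivial, by ring⟩

theorem countP_beq_left (v : Int) (l : List Int) :
    List.countP (fun x => v == x) l = l.count v := by
  rw [List.count]
  apply List.countP_congr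
  intro a _
  simp [BEq.comm]

theorem gA_shift (x : Int) (r : List Int) (k : Nat) :
    gA (x :: r) ((k + 1 : Nat) : Int) = gA r ((k : Nat) : Int) := by
  unfold gA
  rw [PySem.List.pyGetD_natCast, PySem.List.pyGetD_natCast]
  have h1 : (((k + 1 : Nat) : Int) + 1).toNat = k + 2 := by omega
  have h2 : (((k : Nat) : Int) + 1).toNat = k + 1 := by omega
  rw [h1, h2]
  simp

theorem sum_gA_eq_pairCount (L : List Int) :
    ((List.range (PySem.List.len L - 1).toNat).map (fun k => gA L (k : Nat))).sum
      = pairCount L := by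
  induction L with
  | nil => simp [PySem.List.len_eq, pairCount]
  | cons x r ih =>
      have hlen : ((PySem.List.len (x :: r) - 1)).toNat = r.length := by
        simp [PySem.List.len_eq]
      rw [hlen]
      rcases r with _ | ⟨y, r'⟩
      · simp [pairCount]
      · set r := y :: r' with hr
        have hrl : r.length = (r.length - 1) + 1 := by simp [hr]
        rw [hrl, List.range_succ_eq_map]
        simp only [List.map_cons, List.map_map, List.sum_cons, Function.comp_def,
          Nat.succ_eq_add_one]
        have hg0 : gA (x :: r) ((0 : Nat) : Int) = (r.count (x + 50) : Int) := by
          unfold gA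
          norm_num [PySem.List.pyGetD_zero_cons]
        have hmap : (List.range (r.length - 1)).map (fun k => gA (x :: r) ((k + 1 : Nat) : Int))
            = (List.range (r.length - 1)).map (fun k => gA r ((k : Nat) : Int)) := by
          apply List.map_congr_left
          intro k _
          exact gA_shift x r k
        have hlen' : ((PySem.List.len r - 1)).toNat = r.length - 1 := by
          simp [PySem.List.len_eq]
        rw [hlen'] at ih
        rw [hg0, hmap, ih]
        simp [pairCount]

-- A's nested loops over an arbitrary list L compute pairCount L
theorem outer_eq_pairCount (L : List Int) :
    (PySem.List.pyRange 0 (PySem.List.len L - 1)).foldl (fun ans i =>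
      (PySem.List.pyRange (i + 1) (PySem.List.len L)).foldl (fun ans t =>
        if PySem.List.pyGetD L i 0 + 50 = PySem.List.pyGetD L t 0 then ans + 1 else ans)
        ans) 0 = pairCount L := by
  rw [PySem.List.foldl_congr_mem (PySem.List.pyRange 0 (PySem.List.len L - 1))
    (fun ans i =>
      (PySem.List.pyRange (i + 1) (PySem.List.len L)).foldl (fun ans t =>
        if PySem.List.pyGetD L i 0 + 50 = PySem.List.pyGetD L t 0 then ans + 1 else ans) ans)
    (fun ans i => ans + gA L i) 0
    (by
      intro ans i hi
      beta_reduce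
      have hi0 : (0 : Int) ≤ i := (PySem.List.mem_pyRange_one.mp hi).1
      rw [PySem.List.foldl_pyRange_pyGetD L 0
        (fun acc x => if PySem.List.pyGetD L i 0 + 50 = x then acc + 1 else acc) ans
        (by omega)]
      have hc := PySem.List.foldl_count_if (fun x => PySem.List.pyGetD L i 0 + 50 == x)
        (L.drop (i + 1).toNat) ans
      simp only [beq_iff_eq] at hc
      rw [hc, countP_beq_left]
      simp [gA])]
  rw [PySem.List.foldl_add, PySem.List.pyRange_one]
  simp only [sub_zero]
  have : ((List.range (PySem.List.len L - 1).toNat).map (fun k => (0 : Int) + (k : Nat))).map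
      (gA L) = (List.range (PySem.List.len L - 1).toNat).map (fun k => gA L (k : Nat)) := by
    rw [List.map_map]
    apply List.map_congr_left
    intro k _
    simp
  rw [this, sum_gA_eq_pairCount]
  ring

theorem sum_count_cons (p : Int) (rest : List Int) (s : List Int) :
    (s.map (fun a => (((p :: rest).count (a + 50) : Nat) : Int))).sum
      = (s.map (fun a => ((rest.count (a + 50) : Nat) : Int))).sum + (s.count (p - 50) : Int) := by
  induction s with
  | nil => simp
  | cons b t iht =>
      simp only [List.map_cons, List.sum_cons]
      rw [iht]
      have e1 : (p :: rest).count (b + 50)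
          = rest.count (b + 50) + (if b = p - 50 then 1 else 0 : Nat) := by
        rw [List.count_cons]
        by_cases h : b = p - 50
        · have hp : (p == b + 50) = true := by simp; omega
          simp only [hp, if_true, if_pos h]
        · have hp : (p == b + 50) = false := by simp; omega
          simp only [hp, if_false, Bool.false_eq_true, if_neg h, add_zero]
      have e2 : (b :: t).count (p - 50)
          = t.count (p - 50) + (if b = p - 50 then 1 else 0 : Nat) := by
        rw [List.count_cons]
        by_cases h : b = p - 50
        · have hp : (b == p - 50) = true := by simp [h]
          simp only [hp, if_true, if_pos h]
        · have hp : (b == p - 50) = false := by simp [h]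
          simp only [hp, if_false, Bool.false_eq_true, if_neg h, add_zero]
      rw [e1, e2]
      push_cast
      ring

theorem pairsSeen_shift (P : List Int) :
    ∀ s : List Int,
      pairsSeen P s = pairsSeen P []
        + (s.map (fun a => ((P.count (a + 50) : Nat) : Int))).sum := by
  induction P with
  | nil => intro s; simp [pairsSeen]
  | cons p rest ih =>
      intro s
      simp only [pairsSeen, List.count_nil, List.nil_append, Nat.cast_zero]
      rw [ih (s ++ [p]), ih [p]]
      simp only [List.map_append, List.map_cons, List.map_nil, List.sum_append, List.sum_cons,
        List.sum_nil, sum_count_cons]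
      ring

theorem pairsSeen_nil_eq_pairCount (P : List Int) : pairsSeen P [] = pairCount P := by
  induction P with
  | nil => rfl
  | cons x xs ih =>
      simp only [pairsSeen, pairCount, List.count_nil, List.nil_append]
      rw [pairsSeen_shift xs [x], ih]
      simp
      ring

-- B's fold, rephrased over the list of prefix sums; the dict is a counter of s
theorem bfold_eq_pairsSeen (P : List Int) :
    ∀ (s : List Int) (d : PySem.Dict Int Int) (ans : Int),
      (∀ v : Int, d.getD v 0 = (s.count v : Int)) →
      (P.foldl (fun (st : PySem.Dict Int Int × Int) p =>
          (st.1.insert p (st.1.getD p 0 + 1), st.2 + st.1.getD (p - 50) 0))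
        (d, ans)).2
      = ans + pairsSeen P s := by
  induction P with
  | nil => intro s d ans _; simp [pairsSeen]
  | cons p rest ih =>
      intro s d ans hd
      simp only [List.foldl_cons, pairsSeen]
      have hd' : ∀ v : Int,
          (d.insert p (d.getD p 0 + 1)).getD v 0 = (((s ++ [p]).count v : Nat) : Int) := by
        intro v
        rw [PySem.Dict.getD_insert, List.count_append]
        by_cases h : v = p
        · simp [h, hd p]
        · have : [p].count v = 0 := by simp [List.count_singleton]; exact fun hc => h hc.symm
          simp [h, this, hd v]
      rw [ih (s ++ [p]) _ _ hd', hd]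
      ring

-- B computes pairCount of the prefix-sum list
theorem check_alt_eq (lst : List Int) : check_alt lst = pairCount (prefixes 0 lst) := by
  have hfold : ∀ (P : List Int) (c : Int) (seen : PySem.Dict Int Int) (ans : Int),
      (P.foldl (fun (st : PySem.Dict Int Int × Int × Int) i =>
          let cc := st.2.1 + i
          let aa := st.2.2 + st.1.getD (cc - 50) 0
          (st.1.insert cc (st.1.getD cc 0 + 1), cc, aa)) (seen, c, ans)).2.2
      = ((prefixes c P).foldl (fun (st : PySem.Dict Int Int × Int) p =>
          (st.1.insert p (st.1.getD p 0 + 1), st.2 + st.1.getD (p - 50) 0)) (seen, ans)).2 := by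
    intro P
    induction P with
    | nil => intro c seen ans; simp [prefixes]
    | cons i r ihp =>
        intro c seen ans
        simp only [List.foldl_cons, prefixes]
        exact ihp (c + i) _ _
  show (lst.foldl (fun (st : PySem.Dict Int Int × Int × Int) i =>
      let c := st.2.1 + i
      let ans := st.2.2 + st.1.getD (c - 50) 0
      (st.1.insert c (st.1.getD c 0 + 1), c, ans)) (PySem.Dict.empty, 0, 0)).2.2
    = pairCount (prefixes 0 lst)
  rw [hfold lst 0 PySem.Dict.empty 0]
  rw [bfold_eq_pairsSeen (prefixes 0 lst) [] PySem.Dict.empty 0 (by intro v; simp),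
    pairsSeen_nil_eq_pairCount]
  ring

-- A computes the same thing
theorem check_eq (lst : List Int) : check lst = pairCount (prefixes 0 lst) := by
  show (PySem.List.pyRange 0
      (PySem.List.len (lst.foldl (fun (p : List Int × Int) i => (p.1 ++ [p.2 + i], p.2 + i))
        ([], 0)).1 - 1)).foldl _ 0 = pairCount (prefixes 0 lst)
  rw [prefixes_shift lst [] 0]
  simp only [List.nil_append]
  exact outer_eq_pairCount (prefixes 0 lst)

-- ===== VERDICT (by name: the statement is the Claim_ definition above) =====
theorem check_spec : Claim_equal_check := by
  intro lst _
  unfold Spec_check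
  rw [check_eq, check_alt_eq]
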